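-- pv_equiv track=rewrite | github.com/DavideVi/ClusterManager | server.py | region_response_from_data
-- ===== SOURCE A (Python) =====
-- def region_response_from_data(aggregate_data):
--     result = {}
--
--     for instance in aggregate_data:
--
--         # We have zone but we want region
--         instance_region = instance["instance_zone"][:-1]
--
--         # Adding region to results if it does not exist
--         if instance_region not in result:
--             result[instance_region] = {}
--
--         # Adding type into region if it does not exist
--         if instance["instance_type"] not in result[instance_region]:
--             result[instance_region][instance["instance_type"]] = 1
--         # If it does, simply incrementing the counter
--         else:
--             result[instance_region][instance["instance_type"]] += 1
--
--     return result
-- ===== SOURCE B (Python) =====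
-- def region_response_from_data(aggregate_data):
--     # Declarative rebuild: flatten to (region, type) pairs once, then state the
--     # answer directly -- distinct regions in first-occurrence order, and for each
--     # region its distinct types in first-occurrence order, each counted by
--     # scanning the pair list (no incremental counters, no mutation).
--     pairs = [(i["instance_zone"][:-1], i["instance_type"]) for i in aggregate_data]
--     return {r: {t: pairs.count((r, t))
--                 for t in dict.fromkeys(t2 for r2, t2 in pairs if r2 == r)}
--             for r in dict.fromkeys(r for r, _ in pairs)}
-- ===== Notes on version B (the rewrite author's own statement) =====
-- stated objective: alternative
-- what changed: B replaces A's single mutating scan with incremental nested counters by a declarative rebuild: flatten once to (region, type) pairs, then produce the result as nested comprehensions over the deduplicated regions and per-region types, computing each count by scanning the pair list with list.count.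
import Mathlib
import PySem

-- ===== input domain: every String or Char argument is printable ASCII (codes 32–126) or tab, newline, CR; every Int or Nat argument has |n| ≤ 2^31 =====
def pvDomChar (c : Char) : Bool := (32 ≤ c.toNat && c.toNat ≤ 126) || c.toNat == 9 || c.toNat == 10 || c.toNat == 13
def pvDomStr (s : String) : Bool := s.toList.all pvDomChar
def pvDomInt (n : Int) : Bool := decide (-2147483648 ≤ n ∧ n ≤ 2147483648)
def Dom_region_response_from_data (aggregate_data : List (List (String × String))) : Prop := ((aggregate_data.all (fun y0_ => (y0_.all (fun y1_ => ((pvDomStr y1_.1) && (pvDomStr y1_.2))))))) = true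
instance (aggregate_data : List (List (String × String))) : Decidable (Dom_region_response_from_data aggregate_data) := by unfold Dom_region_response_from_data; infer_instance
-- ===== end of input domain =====

-- B drops A's single mutating scan with incremental nested counters for a declarative rebuild:
-- flatten to (region, type) pairs once, then map over the deduplicated regions and per-region
-- types, counting each pair by scanning the pair list (objective: alternative, not faster).

-- shared helper: Python's instance["key"] (Pre_ guarantees the key is present)
def pvLookup (inst : List (String × String)) (k : String) : String :=
  (PySem.Dict.mk inst).getD k ""

-- ===== PORT A =====
-- loop body of A, on the already-extracted region r and type t
def pvAStep (result : PySem.Dict String (PySem.Dict String Int)) (r t : String) :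
    PySem.Dict String (PySem.Dict String Int) :=
  let result := if result.contains r then result else result.insert r PySem.Dict.empty
  let inner := result.getD r PySem.Dict.empty
  if !(inner.contains t) then result.insert r (inner.insert t 1)
  else result.insert r (inner.insert t (inner.getD t 0 + 1))

def region_response_from_data (aggregate_data : List (List (String × String))) : List (String × List (String × Int)) :=
  (aggregate_data.foldl
    (fun result inst =>
      pvAStep result (PySem.Str.slice (pvLookup inst "instance_zone") none (some (-1)))
        (pvLookup inst "instance_type"))
    PySem.Dict.empty).items.map (fun p => (p.1, p.2.items))

-- ===== PORT B =====
def region_response_from_data_alt (aggregate_data : List (List (String × String))) : List (String × List (String × Int)) :=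
  let pairs := aggregate_data.map (fun i =>
    (PySem.Str.slice (pvLookup i "instance_zone") none (some (-1)), pvLookup i "instance_type"))
  (PySem.List.dedup (pairs.map (fun p => p.1))).map (fun r =>
    (r, (PySem.List.dedup ((pairs.filter (fun p => p.1 == r)).map (fun p => p.2))).map
          (fun t => (t, (pairs.count (r, t) : Int)))))

-- ===== PRECONDITION & SPEC =====
-- Pre_ excludes exactly the inputs where A raises KeyError: an instance dict missing
-- "instance_zone" or "instance_type" (B raises there too).
def Pre_region_response_from_data (aggregate_data : List (List (String × String))) : Prop :=
  ∀ inst ∈ aggregate_data,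
    "instance_zone" ∈ inst.map Prod.fst ∧ "instance_type" ∈ inst.map Prod.fst

instance (aggregate_data : List (List (String × String))) : Decidable (Pre_region_response_from_data aggregate_data) := by
  unfold Pre_region_response_from_data; infer_instance

def pvWitness_region_response_from_data : (List (List (String × String))) :=
  [[("instance_zone", "us-east-1a"), ("instance_type", "m1.small")],
   [("instance_zone", "us-east-1b"), ("instance_type", "m1.small")]]

def Spec_region_response_from_data (aggregate_data : List (List (String × String))) (out : List (String × List (String × Int))) : Prop := out = region_response_from_data_alt aggregate_data
instance (aggregate_data : List (List (String × String))) (out : List (String × List (String × Int))) : Decidable (Spec_region_response_from_data aggregate_data out) := by unfold Spec_region_response_from_data; infer_instance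

-- ===== CLAIM (what is proved, stated in full; the proofs are below) =====
def Claim_equal_region_response_from_data : Prop := ∀ (aggregate_data : List (List (String × String))), Dom_region_response_from_data aggregate_data → Pre_region_response_from_data aggregate_data → Spec_region_response_from_data aggregate_data (region_response_from_data aggregate_data)

-- ===== LEMMAS AND PROOFS =====

-- ghost intermediate used only in the proof: the grouping fold (region → list of types)
def pvBStep (groups : PySem.Dict String (List String)) (r t : String) :
    PySem.Dict String (List String) :=
  groups.modify r [] (· ++ [t])

-- the simulation map: a group list becomes its Counter
def pvMap (g : List (String × List String)) : List (String × PySem.Dict String Int) :=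
  g.map (fun p => (p.1, PySem.Dict.counter p.2))

lemma insert_inner_step (d : PySem.Dict String (PySem.Dict String Int)) (r t : String)
    (inner : PySem.Dict String Int) :
    (if !(inner.contains t) then d.insert r (inner.insert t 1)
     else d.insert r (inner.insert t (inner.getD t 0 + 1)))
      = d.insert r (inner.modify t 0 (· + 1)) := by
  by_cases h : inner.contains t
  · simp [h, PySem.Dict.modify]
  · have h' : inner.contains t = false := by simpa using h
    have h0 : inner.getD t 0 = 0 := by
      simp [PySem.Dict.getD, (PySem.Dict.get?_eq_none_iff_contains inner t).2 h']
    simp [h', PySem.Dict.modify, h0]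

lemma contains_map (g : List (String × List String)) (r : String) :
    (PySem.Dict.mk (g.map (fun p => (p.1, PySem.Dict.counter p.2)))).contains r
      = (PySem.Dict.mk g).contains r := by
  simp [PySem.Dict.contains, List.any_map, Function.comp_def]

lemma find?_map (g : List (String × List String)) (r : String) :
    List.find? (fun p => p.1 == r) (g.map (fun p => (p.1, PySem.Dict.counter p.2)))
      = (List.find? (fun p => p.1 == r) g).map (fun p => (p.1, PySem.Dict.counter p.2)) := by
  simp [List.find?_map, Function.comp_def]

lemma get?_map (g : List (String × List String)) (r : String) :
    (PySem.Dict.mk (g.map (fun p => (p.1, PySem.Dict.counter p.2)))).get? r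
      = ((PySem.Dict.mk g).get? r).map PySem.Dict.counter := by
  simp [PySem.Dict.get?, Option.map_map, Function.comp_def]

lemma pv_step (g : List (String × List String)) (r t : String) :
    pvAStep (PySem.Dict.mk (pvMap g)) r t = PySem.Dict.mk (pvMap (pvBStep (PySem.Dict.mk g) r t).items) := by
  unfold pvAStep pvBStep
  simp only [pvMap]
  by_cases hc : (PySem.Dict.mk g).contains r
  · obtain ⟨ts, hts⟩ : ∃ ts, (PySem.Dict.mk g).get? r = some ts := by
      cases h : (PySem.Dict.mk g).get? r with
      | none => exact absurd ((PySem.Dict.get?_eq_none_iff_contains _ r).1 h) (by simp [hc])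
      | some v => exact ⟨v, rfl⟩
    have hinner : (PySem.Dict.mk (g.map (fun p => (p.1, PySem.Dict.counter p.2)))).getD r PySem.Dict.empty
        = PySem.Dict.counter ts := by simp [PySem.Dict.getD, get?_map, hts]
    have hgd : (PySem.Dict.mk g).getD r [] = ts := by simp [PySem.Dict.getD, hts]
    simp only [contains_map, hc, if_true, hinner, insert_inner_step,
      ← PySem.Dict.counter_append_singleton]
    apply PySem.Dict.ext
    simp only [PySem.Dict.modify, hgd, PySem.Dict.insert, contains_map, hc, if_true,
      List.map_map]
    congr 1
    funext p
    by_cases hp : p.1 = r <;> simp [hp]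
  · have hc' : (PySem.Dict.mk g).contains r = false := by simpa only [Bool.not_eq_true] using hc
    have hall : ∀ p ∈ g, p.1 ≠ r := by
      intro p hp hpr
      have hcT : (PySem.Dict.mk g).contains r = true := by
        simp only [PySem.Dict.contains, List.any_eq_true]
        exact ⟨p, hp, by simp [hpr]⟩
      simp [hcT] at hc'
    have hfind : List.find? (fun p => p.1 == r) g = none :=
      List.find?_eq_none.mpr (fun p hp => by simp [hall p hp])
    have hnone : (PySem.Dict.mk g).get? r = none := by simp [PySem.Dict.get?, hfind]
    have hfindm : List.find? (fun p => p.1 == r)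
        (g.map (fun p => (p.1, PySem.Dict.counter p.2))) = none := by
      rw [find?_map, hfind]; rfl
    have hcm : (PySem.Dict.mk (g.map (fun p => (p.1, PySem.Dict.counter p.2)))).contains r = false := by
      rw [contains_map]; exact hc'
    have hinner : (PySem.Dict.mk (g.map (fun p => (p.1, PySem.Dict.counter p.2)) ++ [(r, PySem.Dict.empty)])).getD r PySem.Dict.empty
        = (PySem.Dict.empty : PySem.Dict String Int) := by
      simp [PySem.Dict.getD, PySem.Dict.get?, List.find?_append, hfindm]
    have hgd0 : (PySem.Dict.mk g).getD r [] = [] := by simp [PySem.Dict.getD, hnone]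
    have hce : (PySem.Dict.empty : PySem.Dict String Int).contains t = false := rfl
    have hcont2 : (PySem.Dict.mk (g.map (fun p => (p.1, PySem.Dict.counter p.2)) ++ [(r, PySem.Dict.empty)])).contains r = true := by
      simp [PySem.Dict.contains]
    have hct : PySem.Dict.counter [t] = PySem.Dict.mk [(t, (1 : Int))] := by
      simp [PySem.Dict.counter, PySem.Dict.modify, PySem.Dict.insert, PySem.Dict.getD,
        PySem.Dict.get?, PySem.Dict.contains, PySem.Dict.empty]
    have hid : ∀ v : PySem.Dict String Int,
        List.map (fun p => if (p.1 == r) = true then (r, v) else p)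
          (g.map (fun p => (p.1, PySem.Dict.counter p.2)))
          = g.map (fun p => (p.1, PySem.Dict.counter p.2)) := by
      intro v
      rw [List.map_map]
      apply List.map_congr_left
      intro p hp
      simp [hall p hp]
    simp only [Bool.false_eq_true, if_false, PySem.Dict.insert, hcm]
    simp only [hinner, hce, Bool.not_false, if_true, hcont2]
    apply PySem.Dict.ext
    simp only [PySem.Dict.modify, hgd0, PySem.Dict.insert, hc', Bool.false_eq_true, if_false]
    simp only [List.map_append, List.map_cons, List.map_nil, List.nil_append, hid,
      List.nil_append, hct]
    simp [PySem.Dict.empty]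

lemma pv_loop (ad : List (List (String × String))) (g : List (String × List String)) :
    ad.foldl
      (fun result inst =>
        pvAStep result (PySem.Str.slice (pvLookup inst "instance_zone") none (some (-1)))
          (pvLookup inst "instance_type"))
      (PySem.Dict.mk (pvMap g)) =
    PySem.Dict.mk (pvMap
      (ad.foldl
        (fun gr inst =>
          pvBStep gr (PySem.Str.slice (pvLookup inst "instance_zone") none (some (-1)))
            (pvLookup inst "instance_type"))
        (PySem.Dict.mk g)).items) := by
  induction ad generalizing g with
  | nil => rfl
  | cons x xs ih =>
      simp only [List.foldl_cons, pv_step]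
      exact ih _

-- counting a type inside one region's slice of the pair list is counting the pair itself
lemma count_snd_filter (ps : List (String × String)) (r t : String) :
    ((ps.filter (fun p => p.1 == r)).map (fun p => p.2)).count t = ps.count (r, t) := by
  induction ps with
  | nil => rfl
  | cons p ps ih =>
      by_cases h1 : p.1 = r
      · by_cases h2 : p.2 = t
        · have : p = (r, t) := by cases p; simp_all
          simp [this, ih]
        · have : p ≠ (r, t) := by cases p; simp_all
          simp [h1, h2, this, ih]
      · have : p ≠ (r, t) := by cases p; simp_all
        simp [h1, this, ih]

-- ===== VERDICT (by name: the statement is the Claim_ definition above) =====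
theorem region_response_from_data_spec : Claim_equal_region_response_from_data := by
  intro ad _ _
  unfold Spec_region_response_from_data region_response_from_data region_response_from_data_alt
  have h := pv_loop ad []
  simp only [pvMap, List.map_nil] at h
  rw [show (PySem.Dict.empty : PySem.Dict String (PySem.Dict String Int)) = PySem.Dict.mk [] from rfl, h]
  -- rewrite the grouping fold as a fold over the flattened pair list
  set pairs : List (String × String) := ad.map (fun i =>
    (PySem.Str.slice (pvLookup i "instance_zone") none (some (-1)), pvLookup i "instance_type"))
    with hpairs
  have hfold :
      (ad.foldl
        (fun gr inst =>
          pvBStep gr (PySem.Str.slice (pvLookup inst "instance_zone") none (some (-1)))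
            (pvLookup inst "instance_type"))
        (PySem.Dict.mk [])) =
      pairs.foldl (fun d p => d.modify p.1 [] (· ++ [p.2])) PySem.Dict.empty := by
    rw [hpairs, List.foldl_map]; rfl
  rw [hfold]
  set G := pairs.foldl (fun d p => d.modify p.1 [] (· ++ [p.2])) PySem.Dict.empty with hG
  have hnd : G.keys.Nodup := by
    rw [hG]
    exact PySem.Dict.nodup_keys_foldl_modify_key pairs (fun p => p.1) []
      (fun (_ : PySem.Dict String (List String)) (p : String × String) (l : List String) => l ++ [p.2])
      PySem.Dict.empty PySem.Dict.nodup_keys_empty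
  have hkeys : G.keys = PySem.List.dedup (pairs.map (fun p => p.1)) := by
    rw [hG]
    rw [PySem.Dict.keys_foldl_modify_key pairs (fun p => p.1) []
      (fun (_ : PySem.Dict String (List String)) (p : String × String) (l : List String) => l ++ [p.2]) PySem.Dict.empty]
    simp [PySem.Dict.keys, PySem.Dict.empty, PySem.Set.update_nil_left]
  have hgetD : ∀ r, G.getD r [] = (pairs.filter (fun p => p.1 == r)).map (fun p => p.2) := by
    intro r
    rw [hG, PySem.Dict.getD_foldl_modify_append]
    simp [PySem.Dict.getD, PySem.Dict.empty, PySem.Dict.get?]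
  rw [PySem.Dict.items_eq_map_keys G hnd [], hkeys]
  simp only [List.map_map, Function.comp_def]
  apply List.map_congr_left
  intro r _
  simp only [hgetD r, PySem.Dict.items_counter, PySem.List.dedup_eq_ofList]
  refine congrArg (Prod.mk r) ?_
  apply List.map_congr_left
  intro t _
  rw [count_snd_filter]
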